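-- pv_equiv track=rewrite | github.com/THEGREATSQUARE/whisperlecture | server.py | combine_srt_transcripts
-- ===== SOURCE A (Python) =====
-- def combine_srt_transcripts(transcripts: list[str]) -> str:
--     """Combine multiple SRT transcripts into one"""
--     combined = []
--     subtitle_index = 1
--
--     for transcript in transcripts:
--         lines = transcript.strip().split('\n')
--         current_block = []
--
--         for line in lines:
--             if line.strip() == '':
--                 if current_block:
--                     # Process completed block
--                     if len(current_block) >= 2:
--                         # Replace subtitle index
--                         combined.append(str(subtitle_index))
--                         subtitle_index += 1
--                         # Add timestamp and text
--                         combined.extend(current_block[1:])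
--                         combined.append('')
--                     current_block = []
--             else:
--                 current_block.append(line)
--
--         # Handle last block
--         if current_block and len(current_block) >= 2:
--             combined.append(str(subtitle_index))
--             subtitle_index += 1
--             combined.extend(current_block[1:])
--             combined.append('')
--
--     return '\n'.join(combined)
-- ===== SOURCE B (Python) =====
-- def _blocks(lines):
--     """Maximal runs of non-blank lines, kept only when they have >= 2 lines."""
--     blocks = []
--     while lines:
--         if lines[0].strip() == '':
--             lines = lines[1:]
--         else:
--             k = 1
--             while k < len(lines) and lines[k].strip() != '':
--                 k += 1
--             if k >= 2:
--                 blocks.append(lines[:k])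
--             lines = lines[k:]
--     return blocks
--
--
-- def combine_srt_transcripts(transcripts: list[str]) -> str:
--     """Combine multiple SRT transcripts into one"""
--     blocks = []
--     for transcript in transcripts:
--         blocks.extend(_blocks(transcript.strip().split('\n')))
--     parts = []
--     for n, block in enumerate(blocks, 1):
--         parts.append(str(n))
--         parts.extend(block[1:])
--         parts.append('')
--     return '\n'.join(parts)
-- ===== Notes on version B (the rewrite author's own statement) =====
-- stated objective: alternative
-- what changed: B separates parsing from renumbering: a block-extraction phase that slices maximal non-blank runs out of the line list (two-pointer over the list, no per-line accumulator state and no duplicated last-block handling), then a single renumbering pass over the collected blocks; A interleaves both in one stateful loop.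
import Mathlib
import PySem

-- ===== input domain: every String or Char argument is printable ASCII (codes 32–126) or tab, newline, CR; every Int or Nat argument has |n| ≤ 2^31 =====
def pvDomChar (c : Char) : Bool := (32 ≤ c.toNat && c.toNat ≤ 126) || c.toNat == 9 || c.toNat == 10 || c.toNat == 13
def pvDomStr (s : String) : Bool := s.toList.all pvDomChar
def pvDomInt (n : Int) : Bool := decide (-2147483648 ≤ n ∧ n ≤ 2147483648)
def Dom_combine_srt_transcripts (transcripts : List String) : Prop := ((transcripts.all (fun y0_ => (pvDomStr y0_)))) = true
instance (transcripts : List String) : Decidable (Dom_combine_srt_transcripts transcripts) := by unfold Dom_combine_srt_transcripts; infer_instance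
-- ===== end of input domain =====

-- B re-decomposes A: extract all qualifying blocks first, then renumber them in one pass
-- (objective: alternative structure, same result; not claimed faster).

-- ===== PORT A =====
-- transcript.strip().split('\n'); sep "\n" ≠ "" so split? is always `some` (getD only totalizes)
def pvLines (t : String) : List String := (PySem.Str.split? (PySem.Str.strip t) "\n").getD []

-- inner `for line in lines` body; state = (combined, subtitle_index, current_block)
def pvA_step (st : List String × Int × List String) (line : String) :
    List String × Int × List String :=
  let (combined, idx, cb) := st
  if PySem.Str.strip line = "" then
    if cb ≠ [] then
      if 2 ≤ cb.length then
        (combined ++ [PySem.Int.toStr idx] ++ PySem.List.slice cb (some 1) none ++ [""],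
         idx + 1, [])
      else (combined, idx, [])
    else (combined, idx, cb)
  else (combined, idx, cb ++ [line])

-- the `# Handle last block` tail of the outer loop body
def pvA_finish (r : List String × Int × List String) : List String × Int :=
  if r.2.2 ≠ [] ∧ 2 ≤ r.2.2.length then
    (r.1 ++ [PySem.Int.toStr r.2.1] ++ PySem.List.slice r.2.2 (some 1) none ++ [""], r.2.1 + 1)
  else (r.1, r.2.1)

-- outer `for transcript in transcripts` body, including the last-block handling
def pvA_transcript (st : List String × Int) (transcript : String) : List String × Int :=
  let lines := pvLines transcript
  pvA_finish (lines.foldl pvA_step (st.1, st.2, []))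

def combine_srt_transcripts (transcripts : List String) : String :=
  PySem.Str.join "\n" (transcripts.foldl pvA_transcript ([], 1)).1

-- ===== PORT B =====
-- inner `while k < len(lines) and lines[k].strip() != ''` counter loop of _blocks
def pvB_runlen (lines : List String) (k : Nat) : Nat :=
  if h : k < lines.length then
    if PySem.Str.strip (lines.getD k "") ≠ "" then pvB_runlen lines (k + 1) else k
  else k
termination_by lines.length - k

theorem pvB_runlen_ge (lines : List String) (k : Nat) : k ≤ pvB_runlen lines k := by
  unfold pvB_runlen
  split
  · split
    · exact le_trans (Nat.le_succ k) (pvB_runlen_ge lines (k + 1))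
    · exact le_refl k
  · exact le_refl k
termination_by lines.length - k

-- outer `while lines:` loop of _blocks (lines[:k]/lines[k:] with k ≥ 0 are take/drop, exact)
def pvB_blocks (lines : List String) : List (List String) :=
  match lines with
  | [] => []
  | l :: ls =>
    if PySem.Str.strip l = "" then pvB_blocks ls
    else
      let k := pvB_runlen (l :: ls) 1
      (if 2 ≤ k then [(l :: ls).take k] else []) ++ pvB_blocks ((l :: ls).drop k)
termination_by lines.length
decreasing_by
  · simp
  · have h1 : 1 ≤ pvB_runlen (l :: ls) 1 := pvB_runlen_ge (l :: ls) 1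
    simp only [List.length_drop, List.length_cons]
    omega

-- `for n, block in enumerate(blocks, 1)` loop, carrying the running counter n
def pvB_render (blocks : List (List String)) (n : Int) : List String :=
  match blocks with
  | [] => []
  | b :: bs =>
    (PySem.Int.toStr n :: (PySem.List.slice b (some 1) none ++ [""])) ++ pvB_render bs (n + 1)

def combine_srt_transcripts_alt (transcripts : List String) : String :=
  let blocks := transcripts.foldl
    (fun acc t => acc ++ pvB_blocks (pvLines t)) []
  PySem.Str.join "\n" (pvB_render blocks 1)

-- ===== PRECONDITION & SPEC =====
def Spec_combine_srt_transcripts (transcripts : List String) (out : String) : Prop := out = combine_srt_transcripts_alt transcripts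
instance (transcripts : List String) (out : String) : Decidable (Spec_combine_srt_transcripts transcripts out) := by unfold Spec_combine_srt_transcripts; infer_instance

-- ===== CLAIM (what is proved, stated in full; the proofs are below) =====
def Claim_equal_combine_srt_transcripts : Prop := ∀ (transcripts : List String), Dom_combine_srt_transcripts transcripts → Spec_combine_srt_transcripts transcripts (combine_srt_transcripts transcripts)

-- ===== LEMMAS AND PROOFS =====

-- proof-only spec: the blocks a line list contributes, given a pending partial block cb
def pvSpecBlocks (cb : List String) : List String → List (List String)
  | [] => if 2 ≤ cb.length then [cb] else []
  | l :: ls =>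
    if PySem.Str.strip l = "" then
      (if 2 ≤ cb.length then [cb] else []) ++ pvSpecBlocks [] ls
    else pvSpecBlocks (cb ++ [l]) ls

-- length of the leading non-blank run
def pvNB : List String → Nat
  | [] => 0
  | l :: ls => if PySem.Str.strip l = "" then 0 else pvNB ls + 1

theorem pvB_runlen_eq_nb (lines : List String) (k : Nat) :
    pvB_runlen lines k = k + pvNB (lines.drop k) := by
  unfold pvB_runlen
  split
  · rename_i h
    rw [List.drop_eq_getElem_cons h]
    have hg : lines.getD k "" = lines[k] := by
      simp [List.getD, List.getElem?_eq_getElem h]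
    split
    · rename_i hnb
      rw [pvB_runlen_eq_nb lines (k + 1)]
      rw [hg] at hnb
      simp [pvNB, hnb]
      omega
    · rename_i hb
      rw [hg] at hb
      simp at hb
      simp [pvNB, hb]
  · rename_i h
    rw [List.drop_eq_nil_of_le (by omega)]
    simp [pvNB]
termination_by lines.length - k

-- one unfolding of pvB_blocks in terms of pvNB
theorem pvB_blocks_eq_nb (lines : List String) :
    pvB_blocks lines =
      (if 2 ≤ pvNB lines then [lines.take (pvNB lines)] else []) ++
        pvB_blocks (lines.drop (pvNB lines)) := by
  match lines with
  | [] => simp [pvB_blocks, pvNB]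
  | l :: ls =>
    by_cases hb : PySem.Str.strip l = ""
    · simp [pvB_blocks, pvNB, hb]
    · rw [pvB_blocks]
      simp only [hb, if_false]
      have hk : pvB_runlen (l :: ls) 1 = pvNB (l :: ls) := by
        rw [pvB_runlen_eq_nb]
        simp [pvNB, hb]
        omega
      simp [hk, pvNB, hb]

theorem pvSpecBlocks_eq (lines : List String) (cb : List String) :
    pvSpecBlocks cb lines =
      (if 2 ≤ cb.length + pvNB lines then [cb ++ lines.take (pvNB lines)] else []) ++
        pvB_blocks (lines.drop (pvNB lines)) := by
  induction lines generalizing cb with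
  | nil => simp [pvSpecBlocks, pvNB, pvB_blocks]
  | cons l ls ih =>
    by_cases hb : PySem.Str.strip l = ""
    · rw [pvSpecBlocks]
      simp only [hb, if_true, pvNB]
      have h0 : pvSpecBlocks [] ls = pvB_blocks ls := by
        rw [ih []]
        rw [pvB_blocks_eq_nb ls]
        simp
      rw [h0]
      simp [pvNB, hb, pvB_blocks]
    · rw [pvSpecBlocks]
      simp only [hb, if_false]
      rw [ih (cb ++ [l])]
      have hn : pvNB (l :: ls) = pvNB ls + 1 := by simp [pvNB, hb]
      rw [hn]
      rw [show cb.length + (pvNB ls + 1) = (cb ++ [l]).length + pvNB ls from by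
        simp only [List.length_append, List.length_cons, List.length_nil]; omega]
      simp [List.take_succ_cons, List.drop_succ_cons]

theorem pvSpecBlocks_eq_blocks (lines : List String) :
    pvSpecBlocks [] lines = pvB_blocks lines := by
  rw [pvSpecBlocks_eq, pvB_blocks_eq_nb lines]
  simp

theorem pvB_render_append (b1 b2 : List (List String)) (n : Int) :
    pvB_render (b1 ++ b2) n = pvB_render b1 n ++ pvB_render b2 (n + b1.length) := by
  induction b1 generalizing n with
  | nil => simp [pvB_render]
  | cons b bs ih =>
    simp [pvB_render, ih, add_assoc]
    ring_nf

-- A's inner loop + last-block handling, characterised by pvSpecBlocks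
theorem pvA_inner (lines : List String) (cb combined : List String) (idx : Int) :
    pvA_finish (lines.foldl pvA_step (combined, idx, cb)) =
    (combined ++ pvB_render (pvSpecBlocks cb lines) idx,
     idx + (pvSpecBlocks cb lines).length) := by
  induction lines generalizing cb combined idx with
  | nil =>
    by_cases h2 : 2 ≤ cb.length
    · have hne : cb ≠ [] := by intro h; rw [h] at h2; simp at h2
      simp [pvA_finish, pvSpecBlocks, h2, hne, pvB_render]
    · simp [pvA_finish, pvSpecBlocks, h2, pvB_render]
  | cons l ls ih =>
    by_cases hb : PySem.Str.strip l = ""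
    · by_cases h2 : 2 ≤ cb.length
      · have hne : cb ≠ [] := by intro h; rw [h] at h2; simp at h2
        simp only [List.foldl_cons, pvA_step, hb, if_true, hne, h2,
          ne_eq, not_false_eq_true, if_pos, ite_true]
        rw [ih]
        simp [pvSpecBlocks, hb, h2, pvB_render]
        omega
      · have hstep : pvA_step (combined, idx, cb) l = (combined, idx, []) := by
          by_cases hne : cb = []
          · simp [pvA_step, hb, hne]
          · simp [pvA_step, hb, hne, h2]
        simp only [List.foldl_cons, hstep]
        rw [ih]
        simp [pvSpecBlocks, hb, h2]
    · simp only [List.foldl_cons, pvA_step, hb, if_false, ite_false]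
      rw [ih]
      simp [pvSpecBlocks, hb]
  
-- A's outer loop, characterised by the flattened blocks
theorem pvA_outer (ts : List String) (combined : List String) (idx : Int) :
    ts.foldl pvA_transcript (combined, idx) =
      (combined ++
        pvB_render (ts.flatMap (fun t => pvB_blocks (pvLines t))) idx,
       idx + (ts.flatMap (fun t => pvB_blocks (pvLines t))).length) := by
  induction ts generalizing combined idx with
  | nil => simp [pvB_render]
  | cons t ts ih =>
    simp only [List.foldl_cons]
    have h1 : pvA_transcript (combined, idx) t =
        (combined ++ pvB_render (pvB_blocks (pvLines t)) idx,
         idx + (pvB_blocks (pvLines t)).length) := by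
      simp only [pvA_transcript]
      have := pvA_inner (pvLines t) [] combined idx
      rw [pvSpecBlocks_eq_blocks] at this
      exact this
    rw [h1, ih]
    rw [List.flatMap_cons, pvB_render_append]
    simp [add_assoc, add_comm, add_left_comm]

-- ===== VERDICT (by name: the statement is the Claim_ definition above) =====
theorem combine_srt_transcripts_spec : Claim_equal_combine_srt_transcripts := by
  intro ts _
  unfold Spec_combine_srt_transcripts combine_srt_transcripts combine_srt_transcripts_alt
  rw [pvA_outer]
  rw [PySem.List.foldl_append_eq_flatMap]
  simp
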